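-- pv_equiv track=rewrite | github.com/LRriver/Text2Gremlin | llm_augment/generate_dpo_data.py | count_gremlin_steps
-- ===== SOURCE A (Python) =====
-- def count_gremlin_steps(gremlin: str) -> int:
--     """粗略统计 gremlin 语句的步数（以 '.' 分隔的方法调用数）"""
--     in_str = False
--     dots = 0
--     for i, ch in enumerate(gremlin):
--         if ch in ("'", '"'):
--             in_str = not in_str
--         elif ch == "." and not in_str:
--             dots += 1
--     return dots
-- ===== SOURCE B (Python) =====
-- import re
--
-- def count_gremlin_steps(gremlin: str) -> int:
--     # Segments split on quote chars alternate outside/inside a string literal;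
--     # even-indexed segments are outside, so count dots only there.
--     return sum(s.count('.') for s in re.split(r"['\"]", gremlin)[::2])
-- ===== Notes on version B (the rewrite author's own statement) =====
-- stated objective: simpler
-- what changed: Replaces the character-by-character in_str toggle loop with a split-on-quotes then count dots in even-indexed (outside) segments one-liner.
import Mathlib
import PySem

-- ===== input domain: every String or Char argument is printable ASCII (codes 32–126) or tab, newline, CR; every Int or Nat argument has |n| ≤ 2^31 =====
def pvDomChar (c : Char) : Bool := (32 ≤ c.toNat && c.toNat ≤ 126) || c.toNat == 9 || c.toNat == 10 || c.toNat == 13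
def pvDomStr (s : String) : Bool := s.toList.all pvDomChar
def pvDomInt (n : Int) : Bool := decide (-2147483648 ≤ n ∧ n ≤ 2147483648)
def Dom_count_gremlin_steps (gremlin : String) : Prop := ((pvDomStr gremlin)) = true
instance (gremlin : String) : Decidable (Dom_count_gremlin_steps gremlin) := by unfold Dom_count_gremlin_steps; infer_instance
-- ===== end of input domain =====

-- B replaces A's per-character in_str toggle with split-on-quotes + count dots in even-indexed segments (simpler one-liner).


-- ===== PORT A =====
-- literal port: fold over the characters with state (in_str, dots)
def count_gremlin_steps (gremlin : String) : Int :=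
  (gremlin.toList.foldl
    (fun (st : Bool × Int) ch =>
      if ch = '\'' ∨ ch = '"' then (!st.1, st.2)
      else if ch = '.' ∧ st.1 = false then (st.1, st.2 + 1)
      else st)
    (false, 0)).2

-- ===== PORT B =====
-- hand-written port of re.split(r"['\"]", gremlin): split the char list at quote characters (exact on this domain)
def pvSplitQuotes : List Char → List (List Char)
  | [] => [[]]
  | c :: cs =>
    if c = '\'' ∨ c = '"' then [] :: pvSplitQuotes cs
    else
      match pvSplitQuotes cs with
      | [] => [[c]]          -- unreachable: pvSplitQuotes is never []
      | s :: rest => (c :: s) :: rest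

-- port of the [::2] slice: every second element starting at index 0
def pvEvenIdx {α : Type} : List α → List α
  | [] => []
  | [x] => [x]
  | x :: _ :: xs => x :: pvEvenIdx xs

def count_gremlin_steps_alt (gremlin : String) : Int :=
  (((pvEvenIdx (pvSplitQuotes gremlin.toList)).map (fun s => s.count '.')).sum : Nat)

-- ===== PRECONDITION & SPEC =====
def Spec_count_gremlin_steps (gremlin : String) (out : Int) : Prop := out = count_gremlin_steps_alt gremlin
instance (gremlin : String) (out : Int) : Decidable (Spec_count_gremlin_steps gremlin out) := by unfold Spec_count_gremlin_steps; infer_instance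

-- ===== CLAIM (what is proved, stated in full; the proofs are below) =====
def Claim_equal_count_gremlin_steps : Prop := ∀ (gremlin : String), Dom_count_gremlin_steps gremlin → Spec_count_gremlin_steps gremlin (count_gremlin_steps gremlin)

-- ===== LEMMAS AND PROOFS =====

-- odd-indexed elements, used only in the proofs
def pvOddIdx {α : Type} : List α → List α
  | [] => []
  | _ :: xs => pvEvenIdx xs

theorem pvEvenIdx_cons {α : Type} (x : α) (xs : List α) :
    pvEvenIdx (x :: xs) = x :: pvOddIdx xs := by
  cases xs <;> simp [pvEvenIdx, pvOddIdx]

-- reference count: dots outside strings, with starting state b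
def pvCnt : Bool → List Char → Nat
  | _, [] => 0
  | b, c :: cs =>
    if c = '\'' ∨ c = '"' then pvCnt (!b) cs
    else (if c = '.' ∧ b = false then 1 else 0) + pvCnt b cs

theorem foldA_eq (cs : List Char) : ∀ (b : Bool) (d : Int),
    (cs.foldl
      (fun (st : Bool × Int) ch =>
        if ch = '\'' ∨ ch = '"' then (!st.1, st.2)
        else if ch = '.' ∧ st.1 = false then (st.1, st.2 + 1)
        else st)
      (b, d)).2 = d + (pvCnt b cs : Int) := by
  induction cs with
  | nil => intro b d; simp [pvCnt]
  | cons c cs ih =>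
    intro b d
    by_cases hq : c = '\'' ∨ c = '"'
    · simp [List.foldl, hq, pvCnt, ih]
    · by_cases hd : c = '.' ∧ b = false
      · simp [List.foldl, hd, pvCnt, ih]; ring
      · simp [List.foldl, hq, hd, pvCnt, ih]

theorem pvSplitQuotes_ne (cs : List Char) : pvSplitQuotes cs ≠ [] := by
  cases cs with
  | nil => simp [pvSplitQuotes]
  | cons c cs =>
    by_cases hq : c = '\'' ∨ c = '"'
    · simp [pvSplitQuotes, hq]
    · simp [pvSplitQuotes, hq]
      split <;> simp

theorem sum_split (cs : List Char) :
    ((pvEvenIdx (pvSplitQuotes cs)).map (fun s => s.count '.')).sum = pvCnt false cs ∧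
    ((pvOddIdx (pvSplitQuotes cs)).map (fun s => s.count '.')).sum = pvCnt true cs := by
  induction cs with
  | nil => simp [pvSplitQuotes, pvEvenIdx, pvOddIdx, pvCnt]
  | cons c cs ih =>
    obtain ⟨s, rest, hsp⟩ := List.exists_cons_of_ne_nil (pvSplitQuotes_ne cs)
    have ih1 := ih.1
    have ih2 := ih.2
    rw [hsp, pvEvenIdx_cons] at ih1
    rw [hsp] at ih2
    simp only [pvOddIdx] at ih2
    by_cases hq : c = '\'' ∨ c = '"'
    · have h1 : pvSplitQuotes (c :: cs) = [] :: s :: rest := by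
        simp [pvSplitQuotes, hq, hsp]
      constructor
      · rw [h1, pvEvenIdx_cons]
        simp only [pvOddIdx]
        simp [pvCnt, hq, ih2]
      · rw [h1]
        simp only [pvOddIdx]
        rw [pvEvenIdx_cons]
        simp [pvCnt, hq]
        simp at ih1
        omega
    · have h1 : pvSplitQuotes (c :: cs) = (c :: s) :: rest := by
        simp [pvSplitQuotes, hq, hsp]
      constructor
      · rw [h1, pvEvenIdx_cons]
        simp [pvCnt, hq]
        simp at ih1
        by_cases hd : c = '.' <;> simp [hd] at * <;> omega
      · rw [h1]
        simp only [pvOddIdx]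
        simp [pvCnt, hq, ih2]

-- ===== VERDICT (by name: the statement is the Claim_ definition above) =====
theorem count_gremlin_steps_spec : Claim_equal_count_gremlin_steps := by
  intro g _
  show count_gremlin_steps g = count_gremlin_steps_alt g
  unfold count_gremlin_steps count_gremlin_steps_alt
  rw [foldA_eq, (sum_split g.toList).1]
  simp
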